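-- pv_equiv track=rewrite | github.com/gdsfactory/gdsfactory | gdsfactory/read/from_yaml_template.py | split_default_settings_from_yaml
-- ===== SOURCE A (Python) =====
-- def split_default_settings_from_yaml(yaml_lines: list[str]) -> tuple[str, str]:
--     """Separates out the 'default_settings' block from the rest of the file body.
--
--     Note: 'default settings' MUST be at the TOP of the file.
--
--     Args:
--         yaml_lines: the lines of text in the yaml file.
--
--     Returns:
--         a tuple of (main file contents), (setting block), both as multi-line strings.
--     """
--     settings_lines: list[str] = []
--     other_lines: list[str] = []
--     # start reading all lines
--     while yaml_lines:
--         # pop lines until we find the default_settings block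
--         line = yaml_lines.pop(0)
--         if line.startswith("default_settings"):
--             settings_lines.append(line)
--             # keep adding lines to settings until we find a new top-level block...
--             # then we will add the rest of the lines to the main file block
--             while yaml_lines:
--                 next_line = yaml_lines.pop(0)
--                 if next_line[0].isspace():
--                     settings_lines.append(next_line)
--                 else:
--                     other_lines.append(next_line)
--                     break
--         else:
--             other_lines.append(line)
--     settings_string = "\n".join(settings_lines)
--     other_string = "\n".join(other_lines)
--     return other_string, settings_string
-- ===== SOURCE B (Python) =====
-- def split_default_settings_from_yaml(yaml_lines: list[str]) -> tuple[str, str]: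
--     """Single flag-driven pass; return value only (A also empties yaml_lines in place, B does not)."""
--     settings_lines: list[str] = []
--     other_lines: list[str] = []
--     in_settings = False
--     for line in yaml_lines:
--         if in_settings:
--             if line[0].isspace():
--                 settings_lines.append(line)
--             else:
--                 other_lines.append(line)
--                 in_settings = False
--         elif line.startswith("default_settings"):
--             settings_lines.append(line)
--             in_settings = True
--         else:
--             other_lines.append(line)
--     return "\n".join(other_lines), "\n".join(settings_lines)
-- ===== Notes on version B (the rewrite author's own statement) =====
-- stated objective: faster
-- what changed: Replaces A's destructive nested while-loops (quadratic pop(0) with an inner block-consuming loop) by one non-mutating O(n) for-loop over the lines with an in_settings boolean flag; return value is identical, but B does not empty the input list in place as A does.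
import Mathlib
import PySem

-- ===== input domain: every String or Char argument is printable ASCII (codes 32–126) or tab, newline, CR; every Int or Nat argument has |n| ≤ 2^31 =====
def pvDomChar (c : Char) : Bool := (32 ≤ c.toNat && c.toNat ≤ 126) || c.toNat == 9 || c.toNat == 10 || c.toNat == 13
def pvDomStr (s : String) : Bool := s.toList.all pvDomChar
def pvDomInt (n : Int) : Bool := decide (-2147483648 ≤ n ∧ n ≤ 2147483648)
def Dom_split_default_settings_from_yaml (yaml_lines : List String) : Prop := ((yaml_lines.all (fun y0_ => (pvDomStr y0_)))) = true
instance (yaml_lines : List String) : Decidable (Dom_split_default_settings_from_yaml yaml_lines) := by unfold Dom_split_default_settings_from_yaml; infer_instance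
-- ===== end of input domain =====

-- B replaces A's destructive nested while-loops by one non-mutating flag-driven pass (return value only:
-- A also empties its argument list in place, B does not).

-- shared line predicates (the subexpressions both Pythons evaluate)
-- line.startswith("default_settings")
def pvStartsDS (l : String) : Bool := PySem.Str.startswith l "default_settings"
-- line[0].isspace(); line[0] on "" raises IndexError in Python (excluded by Pre_), the port returns false there
def pvIndented (l : String) : Bool :=
  match PySem.Str.pyGet? l 0 with
  | some c => PySem.Chars.isspace c
  | none => false

-- ===== PORT A =====
-- inner while-loop: pops lines into settings until a non-indented line breaks into other;
-- returns (settings appended, other appended, remaining lines)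
def pvA_inner : List String → List String × List String × List String
  | [] => ([], [], [])
  | l :: rest =>
    if pvIndented l then
      let t := pvA_inner rest
      (l :: t.1, t.2.1, t.2.2)
    else
      ([], [l], rest)

theorem pvA_inner_len (l : List String) : (pvA_inner l).2.2.length ≤ l.length := by
  induction l with
  | nil => simp [pvA_inner]
  | cons x xs ih =>
    simp only [pvA_inner]
    split
    · simpa using Nat.le_succ_of_le ih
    · simp

-- outer while-loop over the popped lines, accumulating settings_lines and other_lines
def pvA_outer : List String → List String → List String → List String × List String
  | [], s, o => (s, o)
  | l :: rest, s, o =>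
    if pvStartsDS l then
      let t := pvA_inner rest
      pvA_outer t.2.2 (s ++ l :: t.1) (o ++ t.2.1)
    else
      pvA_outer rest s (o ++ [l])
termination_by l _ _ => l.length
decreasing_by
  · exact Nat.lt_succ_of_le (pvA_inner_len rest)
  · simp

def split_default_settings_from_yaml (yaml_lines : List String) : String × String :=
  let t := pvA_outer yaml_lines [] []
  (PySem.Str.join "\n" t.2, PySem.Str.join "\n" t.1)

-- ===== PORT B =====
-- single pass with the in_settings flag
def pvB_loop : List String → Bool → List String → List String → List String × List String
  | [], _, s, o => (s, o)
  | l :: rest, true, s, o =>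
    if pvIndented l then pvB_loop rest true (s ++ [l]) o
    else pvB_loop rest false s (o ++ [l])
  | l :: rest, false, s, o =>
    if pvStartsDS l then pvB_loop rest true (s ++ [l]) o
    else pvB_loop rest false s (o ++ [l])

def split_default_settings_from_yaml_alt (yaml_lines : List String) : String × String :=
  let t := pvB_loop yaml_lines false [] []
  (PySem.Str.join "\n" t.2, PySem.Str.join "\n" t.1)

-- ===== PRECONDITION & SPEC =====
-- Pre_ excludes lists containing an empty line preceded by a 'default_settings' line with only
-- indented lines in between: there Python evaluates ''[0] inside a settings block and raises
-- IndexError (both A and B raise). The condition slightly over-approximates (see cites): when a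
-- chained second 'default_settings' line had already closed the block, A returns and B returns
-- the same value.
def Pre_split_default_settings_from_yaml (yaml_lines : List String) : Prop :=
  ¬ ∃ i < yaml_lines.length, ∃ j < i,
      yaml_lines.getD i "" = "" ∧ pvStartsDS (yaml_lines.getD j "") = true ∧
      ∀ k < i, j < k → pvIndented (yaml_lines.getD k "") = true
instance (yaml_lines : List String) : Decidable (Pre_split_default_settings_from_yaml yaml_lines) := by
  unfold Pre_split_default_settings_from_yaml; infer_instance

def pvWitness_split_default_settings_from_yaml : List String :=
  ["default_settings:", "  width: 10", "pdk: sky130", "", "instances:"]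

def Spec_split_default_settings_from_yaml (yaml_lines : List String) (out : String × String) : Prop := out = split_default_settings_from_yaml_alt yaml_lines
instance (yaml_lines : List String) (out : String × String) : Decidable (Spec_split_default_settings_from_yaml yaml_lines out) := by unfold Spec_split_default_settings_from_yaml; infer_instance

-- ===== CLAIM (what is proved, stated in full; the proofs are below) =====
def Claim_equal_split_default_settings_from_yaml : Prop := ∀ (yaml_lines : List String), Dom_split_default_settings_from_yaml yaml_lines → Pre_split_default_settings_from_yaml yaml_lines → Spec_split_default_settings_from_yaml yaml_lines (split_default_settings_from_yaml yaml_lines)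

-- ===== LEMMAS AND PROOFS =====

-- B's loop with the flag set computes exactly A's inner while-loop followed by B's loop with the flag cleared
theorem pvB_loop_true (l : List String) : ∀ s o,
    pvB_loop l true s o =
      pvB_loop (pvA_inner l).2.2 false (s ++ (pvA_inner l).1) (o ++ (pvA_inner l).2.1) := by
  induction l with
  | nil => intro s o; simp [pvA_inner, pvB_loop]
  | cons x xs ih =>
    intro s o
    simp only [pvA_inner, pvB_loop]
    split
    · rw [ih (s ++ [x]) o]; simp
    · simp

-- A's outer loop equals B's loop with the flag cleared
theorem pvA_outer_eq (l s o : List String) : pvA_outer l s o = pvB_loop l false s o := by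
  induction l, s, o using pvA_outer.induct with
  | case1 s o => simp [pvA_outer, pvB_loop]
  | case2 l rest s o h t ih =>
    simp only [pvA_outer, pvB_loop, h, if_pos]
    rw [ih, pvB_loop_true]
    simp only [t, List.append_assoc, List.singleton_append]
  | case3 l rest s o h ih =>
    simp only [pvA_outer, pvB_loop, h, Bool.false_eq_true, if_false]
    exact ih

-- ===== VERDICT (by name: the statement is the Claim_ definition above) =====
theorem split_default_settings_from_yaml_spec : Claim_equal_split_default_settings_from_yaml := by
  intro yaml_lines _ _
  unfold Spec_split_default_settings_from_yaml
  unfold split_default_settings_from_yaml split_default_settings_from_yaml_alt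
  rw [pvA_outer_eq]
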